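-- pv_equiv track=rewrite | github.com/swarbricklab/qxub | qxub/config/handler.py | _sanitize_job_name
-- ===== SOURCE A (Python) =====
-- def _sanitize_job_name(name):
--     """Sanitize job name for PBS compliance.
--
--     PBS job names cannot contain certain characters like /, :, @, etc.
--     Replace problematic characters with safe alternatives.
--     """
--     if not name:
--         return name
--
--     # Replace problematic characters with safe alternatives
--     sanitized = name.replace("/", "_")  # Paths to underscores
--     sanitized = sanitized.replace(":", "_")  # Colons to underscores
--     sanitized = sanitized.replace(" ", "_")  # Spaces to underscores
--     sanitized = sanitized.replace("@", "_")  # At symbols to underscores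
--
--     # Remove any remaining non-alphanumeric characters except hyphens and underscores
--     sanitized = "".join(c for c in sanitized if c.isalnum() or c in "-_")
--
--     # Ensure it starts with a letter or number (not special character)
--     if sanitized and not sanitized[0].isalnum():
--         sanitized = "job_" + sanitized
--
--     return sanitized
-- ===== SOURCE B (Python) =====
-- def _sanitize_job_name(name):
--     """Single pass: remap or drop each character, then apply the leading guard."""
--     if not name:
--         return name
--
--     def emit(c):
--         if c in "/: @":
--             return "_"
--         if c.isalnum() or c in "-_":
--             return c
--         return ""
--
--     sanitized = "".join(map(emit, name))
--
--     if sanitized and not sanitized[0].isalnum():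
--         sanitized = "job_" + sanitized
--
--     return sanitized
-- ===== Notes on version B (the rewrite author's own statement) =====
-- stated objective: alternative
-- what changed: Replaces A's four sequential str.replace passes plus a separate filtering pass with a single traversal that maps each character to an underscore, itself, or nothing and joins the results.
import Mathlib
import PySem

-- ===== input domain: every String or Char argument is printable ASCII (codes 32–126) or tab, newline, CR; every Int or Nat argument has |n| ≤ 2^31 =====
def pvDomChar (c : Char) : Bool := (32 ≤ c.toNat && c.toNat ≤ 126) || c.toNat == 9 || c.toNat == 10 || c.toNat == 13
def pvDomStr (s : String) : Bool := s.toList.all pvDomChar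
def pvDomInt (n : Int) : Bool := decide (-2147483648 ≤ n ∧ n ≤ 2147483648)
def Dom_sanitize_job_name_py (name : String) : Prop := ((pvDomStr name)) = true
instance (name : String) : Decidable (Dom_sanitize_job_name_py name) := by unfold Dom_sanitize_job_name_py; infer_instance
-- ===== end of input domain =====

-- B replaces A's four sequential replace passes + filter pass with one per-character map/filter traversal (alternative decomposition, same cost).


-- ===== PORT A =====
-- literal transliteration of A: four str.replace passes, a filter pass, then the leading guard
def sanitize_job_name_py (name : String) : String :=
  if name == "" then name
  else
    let s1 := PySem.Str.replace name "/" "_"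
    let s2 := PySem.Str.replace s1 ":" "_"
    let s3 := PySem.Str.replace s2 " " "_"
    let s4 := PySem.Str.replace s3 "@" "_"
    -- "".join(c for c in sanitized if c.isalnum() or c in "-_")
    let s5 : List Char := s4.toList.filter (fun c => PySem.Chars.isalnum c || PySem.Chars.isIn [c] "-_".toList)
    -- if sanitized and not sanitized[0].isalnum(): sanitized = "job_" + sanitized
    if (!s5.isEmpty) && !((PySem.List.pyGet? s5 0).elim false PySem.Chars.isalnum) then
      String.ofList ("job_".toList ++ s5)
    else
      String.ofList s5

-- ===== PORT B =====
-- per-character emission of Source B's `emit`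
def sjnEmit (c : Char) : List Char :=
  if PySem.Chars.isIn [c] "/: @".toList then ['_']
  else if PySem.Chars.isalnum c || PySem.Chars.isIn [c] "-_".toList then [c]
  else []

def sanitize_job_name_py_alt (name : String) : String :=
  if name == "" then name
  else
    -- sanitized = "".join(map(emit, name))
    let s : List Char := name.toList.flatMap sjnEmit
    if (!s.isEmpty) && !((PySem.List.pyGet? s 0).elim false PySem.Chars.isalnum) then
      String.ofList ("job_".toList ++ s)
    else
      String.ofList s

-- ===== PRECONDITION & SPEC =====
def Spec_sanitize_job_name_py (name : String) (out : String) : Prop := out = sanitize_job_name_py_alt name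
instance (name : String) (out : String) : Decidable (Spec_sanitize_job_name_py name out) := by unfold Spec_sanitize_job_name_py; infer_instance

-- ===== CLAIM (what is proved, stated in full; the proofs are below) =====
def Claim_equal_sanitize_job_name_py : Prop := ∀ (name : String), Dom_sanitize_job_name_py name → Spec_sanitize_job_name_py name (sanitize_job_name_py name)

-- ===== LEMMAS AND PROOFS =====

-- membership of a single character in a string is list membership
theorem sjn_isIn_singleton (c : Char) (l : List Char) :
    PySem.Chars.isIn [c] l = l.contains c := by
  by_cases h : c ∈ l
  · rw [(PySem.Chars.isIn_iff_infix [c] l).mpr ((List.singleton_infix_iff c l).mpr h)]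
    simp [h]
  · rw [(PySem.Chars.isIn_eq_false_iff [c] l).mpr (fun hin => h ((List.singleton_infix_iff c l).mp hin))]
    simp [h]

-- str.replace with a single-character pattern is a pointwise map
theorem sjn_replace_go_single (a b : Char) :
    ∀ (fuel : Nat) (l acc : List Char), l.length ≤ fuel →
      PySem.Chars.replace.go [a] [b] fuel l acc
        = acc.reverse ++ l.map (fun c => if c == a then b else c) := by
  intro fuel
  induction fuel with
  | zero =>
    intro l acc h
    cases l with
    | nil => simp [PySem.Chars.replace.go]
    | cons c t => simp at h
  | succ n ih =>
    intro l acc h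
    cases l with
    | nil => simp [PySem.Chars.replace.go]
    | cons c t =>
      by_cases hc : c = a
      · subst hc
        have hp : [c].isPrefixOf (c :: t) = true := by simp [List.isPrefixOf]
        simp only [PySem.Chars.replace.go, hp, if_pos]
        rw [show List.drop [c].length (c :: t) = t from rfl,
            show ([b].reverse ++ acc) = b :: acc from rfl,
            ih t (b :: acc) (by simpa using Nat.le_of_succ_le_succ h)]
        simp
      · have hp : [a].isPrefixOf (c :: t) = false := by
          simp [List.isPrefixOf]; exact fun h => hc h.symm
        simp only [PySem.Chars.replace.go, hp]
        rw [ih t (c :: acc) (by simpa using Nat.le_of_succ_le_succ h)]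
        simp [hc]

theorem sjn_replace_single (a b : Char) (l : List Char) :
    PySem.Chars.replace l [a] [b] = l.map (fun c => if c == a then b else c) := by
  simpa using sjn_replace_go_single a b l.length l [] le_rfl

-- the four maps followed by the filter collapse into B's single flatMap
theorem sjn_core (l : List Char) :
    (((((l.map (fun c => if c == '/' then '_' else c)).map (fun c => if c == ':' then '_' else c)).map
        (fun c => if c == ' ' then '_' else c)).map (fun c => if c == '@' then '_' else c)).filter
        (fun c => PySem.Chars.isalnum c || PySem.Chars.isIn [c] "-_".toList))
      = l.flatMap sjnEmit := by
  induction l with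
  | nil => rfl
  | cons c t ih =>
    simp only [List.map_cons, List.flatMap_cons, ← ih, List.filter, sjnEmit, sjn_isIn_singleton]
    by_cases h1 : c = '/' <;> by_cases h2 : c = ':' <;> by_cases h3 : c = ' ' <;> by_cases h4 : c = '@' <;>
      simp_all <;>
      (by_cases h5 : PySem.Chars.isalnum c <;>
         by_cases h6 : c = '-' <;> by_cases h7 : c = '_' <;> simp_all)

-- ===== VERDICT (by name: the statement is the Claim_ definition above) =====
theorem sanitize_job_name_py_spec : Claim_equal_sanitize_job_name_py := by
  intro name _
  unfold Spec_sanitize_job_name_py sanitize_job_name_py sanitize_job_name_py_alt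
  by_cases h : name == ""
  · simp [h]
  · simp only [h, Bool.false_eq_true, if_false]
    have h1 : ∀ s : String, (PySem.Str.replace s "/" "_").toList
        = s.toList.map (fun c => if c == '/' then '_' else c) := fun s => by
      rw [PySem.Str.toList_replace]; exact sjn_replace_single '/' '_' s.toList
    have h2 : ∀ s : String, (PySem.Str.replace s ":" "_").toList
        = s.toList.map (fun c => if c == ':' then '_' else c) := fun s => by
      rw [PySem.Str.toList_replace]; exact sjn_replace_single ':' '_' s.toList
    have h3 : ∀ s : String, (PySem.Str.replace s " " "_").toList
        = s.toList.map (fun c => if c == ' ' then '_' else c) := fun s => by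
      rw [PySem.Str.toList_replace]; exact sjn_replace_single ' ' '_' s.toList
    have h4 : ∀ s : String, (PySem.Str.replace s "@" "_").toList
        = s.toList.map (fun c => if c == '@' then '_' else c) := fun s => by
      rw [PySem.Str.toList_replace]; exact sjn_replace_single '@' '_' s.toList
    have key : (PySem.Str.replace (PySem.Str.replace (PySem.Str.replace (PySem.Str.replace name "/" "_") ":" "_") " " "_") "@" "_").toList.filter
            (fun c => PySem.Chars.isalnum c || PySem.Chars.isIn [c] "-_".toList)
          = name.toList.flatMap sjnEmit := by
      rw [h4, h3, h2, h1]
      exact sjn_core name.toList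
    rw [key]
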